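-- pv_equiv track=rewrite | github.com/lucigrigo/practice-makes-perfect | TestSources/CodeJam2021/QualificationRound2021/reverseeng.py | operationL
-- ===== SOURCE A (Python) =====
-- def operationL(n, c):
-- 	if c < n - 1:
-- 		return []
-- 	l = []
-- 	t = 0
-- 	cc = 1
-- 	for i in range(n - 1, 0, -1):
-- 		cc += 1
-- 		if t + cc + i - 1 >= c:
-- 			r = c - t - i + 1
-- 			l.append(r)
-- 			for k in range(i - 1):
-- 				l.append(1)
-- 			t = c
-- 			break
-- 		t += cc
-- 		l.append(cc)
-- 	if t < c:
-- 		return []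
-- 	return l
-- ===== SOURCE B (Python) =====
-- def operationL(n, c):
--     # bounds: need at least 2 elements and a reachable cost
--     if n < 2 or c < n - 1 or c > n * (n + 1) // 2 - 1:
--         return []
--     d = c - n
--     # binary search for the smallest m >= 0 with (m+1)(m+2)//2 - 1 >= d
--     lo, hi = 0, n - 2
--     while lo < hi:
--         mid = (lo + hi) // 2
--         if (mid + 1) * (mid + 2) // 2 - 1 >= d:
--             hi = mid
--         else:
--             lo = mid + 1
--     m = lo
--     r = c - ((m + 1) * (m + 2) // 2 - 1) - (n - 1 - m) + 1
--     return list(range(2, m + 2)) + [r] + [1] * (n - 2 - m)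
-- ===== Notes on version B (the rewrite author's own statement) =====
-- stated objective: alternative
-- what changed: Replaces A's linear accumulate-and-test scan over range(n-1,0,-1) by bound checks in closed form plus a binary search for the break index m, then materializes the answer directly as range(2,m+2) + [r] + [1]*(n-2-m).
import Mathlib
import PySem

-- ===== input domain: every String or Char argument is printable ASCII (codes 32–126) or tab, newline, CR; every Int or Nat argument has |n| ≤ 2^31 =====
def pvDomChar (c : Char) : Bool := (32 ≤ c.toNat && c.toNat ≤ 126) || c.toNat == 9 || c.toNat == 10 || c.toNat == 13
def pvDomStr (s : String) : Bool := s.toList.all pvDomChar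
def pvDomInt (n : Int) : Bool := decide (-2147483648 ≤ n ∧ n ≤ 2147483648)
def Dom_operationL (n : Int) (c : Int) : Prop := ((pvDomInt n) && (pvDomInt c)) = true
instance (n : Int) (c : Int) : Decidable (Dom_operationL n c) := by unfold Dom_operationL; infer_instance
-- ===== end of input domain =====

-- B replaces A's linear accumulate-and-test scan by closed-form bound checks plus a
-- binary search for the break index, materializing the result list directly (alternative).

-- ===== PORT A =====
-- the main for-loop of A: state (l, t, cc), iterating over the (descending) range list;
-- breaking returns immediately with t set to c
def opAInner (c : Int) : List Int → List Int → Int → Int → (List Int × Int)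
  | [], l, t, _ => (l, t)
  | i :: rest, l, t, cc =>
    let cc' := cc + 1
    if t + cc' + i - 1 ≥ c then
      (((PySem.List.pyRange 0 (i - 1) 1).foldl (fun acc _ => acc ++ [(1 : Int)])
          (l ++ [c - t - i + 1])), c)
    else opAInner c rest (l ++ [cc']) (t + cc') cc'

def operationL (n : Int) (c : Int) : List Int :=
  if c < n - 1 then []
  else
    let p := opAInner c (PySem.List.pyRange (n - 1) 0 (-1)) [] 0 1
    if p.2 < c then [] else p.1

-- ===== PORT B =====
-- binary search: smallest x in [lo, hi] with (x+1)(x+2)//2 - 1 >= d (the while-loop of Source B)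
def bsearchB (d : Int) (lo hi : Int) : Int :=
  if h : lo < hi then
    let mid := PySem.Int.floordiv (lo + hi) 2
    if PySem.Int.floordiv ((mid + 1) * (mid + 2)) 2 - 1 ≥ d then bsearchB d lo mid
    else bsearchB d (mid + 1) hi
  else lo
termination_by (hi - lo).toNat
decreasing_by
  · have h2 := PySem.Int.floordiv_two_mid_bounds (le_of_lt h)
    have : PySem.Int.floordiv (lo + hi) 2 = (lo + hi) / 2 :=
      PySem.Int.floordiv_eq_ediv_of_pos (by norm_num)
    omega
  · have h2 := PySem.Int.floordiv_two_mid_bounds (le_of_lt h)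
    have : PySem.Int.floordiv (lo + hi) 2 = (lo + hi) / 2 :=
      PySem.Int.floordiv_eq_ediv_of_pos (by norm_num)
    omega

def operationL_alt (n : Int) (c : Int) : List Int :=
  if n < 2 ∨ c < n - 1 ∨ c > PySem.Int.floordiv (n * (n + 1)) 2 - 1 then []
  else
    let d := c - n
    let m := bsearchB d 0 (n - 2)
    let r := c - (PySem.Int.floordiv ((m + 1) * (m + 2)) 2 - 1) - (n - 1 - m) + 1
    PySem.List.pyRange 2 (m + 2) 1 ++ [r] ++ PySem.List.pyRepeat [1] (n - 2 - m)

-- ===== PRECONDITION & SPEC =====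
def Spec_operationL (n : Int) (c : Int) (out : List Int) : Prop := out = operationL_alt n c
instance (n : Int) (c : Int) (out : List Int) : Decidable (Spec_operationL n c out) := by unfold Spec_operationL; infer_instance

-- ===== CLAIM (what is proved, stated in full; the proofs are below) =====
def Claim_equal_operationL : Prop := ∀ (n : Int) (c : Int), Dom_operationL n c → Spec_operationL n c (operationL n c)

-- ===== LEMMAS AND PROOFS =====

-- triangular helper: Tri j = 2 + 3 + ... + (j+1) = (j+1)(j+2)/2 - 1
def Tri : Nat → Int
  | 0 => 0
  | j + 1 => Tri j + ((j : Int) + 2)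

lemma Tri_closed (j : Nat) : 2 * Tri j = ((j : Int) + 1) * ((j : Int) + 2) - 2 := by
  induction j with
  | zero => simp [Tri]
  | succ j ih => simp only [Tri]; push_cast; push_cast at ih; ring_nf; ring_nf at ih; omega

lemma floordiv_tri (j : Nat) :
    PySem.Int.floordiv (((j : Int) + 1) * ((j : Int) + 2)) 2 - 1 = Tri j := by
  have h := Tri_closed j
  have : PySem.Int.floordiv (((j : Int) + 1) * ((j : Int) + 2)) 2
      = (((j : Int) + 1) * ((j : Int) + 2)) / 2 :=
    PySem.Int.floordiv_eq_ediv_of_pos (by norm_num)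
  omega

lemma Tri_mono {j k : Nat} (h : j ≤ k) : Tri j ≤ Tri k := by
  induction k with
  | zero => simp [Nat.le_zero.mp h]
  | succ k ih =>
    rcases Nat.lt_or_ge j (k+1) with h' | h'
    · have := ih (by omega); simp only [Tri]; omega
    · have : j = k + 1 := by omega
      simp [this]

-- the while-loop of Source B: if d ≤ Tri hi holds on entry, it returns the least x in [lo,hi]
-- with d ≤ Tri x (stated via its two defining inequalities)
lemma bsearchB_inv (d : Int) : ∀ (fuel : Nat) (lo hi : Int), (hi - lo).toNat ≤ fuel →
    0 ≤ lo → lo ≤ hi →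
    d ≤ PySem.Int.floordiv ((hi + 1) * (hi + 2)) 2 - 1 →
    lo ≤ bsearchB d lo hi ∧ bsearchB d lo hi ≤ hi ∧
      d ≤ PySem.Int.floordiv ((bsearchB d lo hi + 1) * (bsearchB d lo hi + 2)) 2 - 1 ∧
      (lo < bsearchB d lo hi →
        PySem.Int.floordiv (bsearchB d lo hi * (bsearchB d lo hi + 1)) 2 - 1 < d) := by
  intro fuel
  induction fuel with
  | zero =>
    intro lo hi hf h0 hlh hhi
    have he : lo = hi := by omega
    subst he
    rw [bsearchB]
    rw [dif_neg (lt_irrefl _)]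
    exact ⟨le_refl _, le_refl _, hhi, fun hcon => absurd hcon (lt_irrefl _)⟩
  | succ fuel ih =>
    intro lo hi hf h0 hlh hhi
    by_cases hlt : lo < hi
    · have hdiv : PySem.Int.floordiv (lo + hi) 2 = (lo + hi) / 2 :=
        PySem.Int.floordiv_eq_ediv_of_pos (by norm_num)
      have hmb : lo ≤ PySem.Int.floordiv (lo + hi) 2 ∧ PySem.Int.floordiv (lo + hi) 2 < hi := by
        constructor <;> omega
      rw [bsearchB]
      rw [dif_pos hlt]
      set mid := PySem.Int.floordiv (lo + hi) 2 with hmidd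
      by_cases hc : PySem.Int.floordiv ((mid + 1) * (mid + 2)) 2 - 1 ≥ d
      · rw [if_pos hc]
        obtain ⟨i1, i2, i3, i4⟩ := ih lo mid (by omega) h0 (by omega) hc
        exact ⟨i1, by omega, i3, i4⟩
      · rw [if_neg hc]
        push Not at hc
        obtain ⟨i1, i2, i3, i4⟩ := ih (mid + 1) hi (by omega) (by omega) (by omega) hhi
        refine ⟨by omega, i2, i3, fun _ => ?_⟩
        by_cases hr : mid + 1 < bsearchB d (mid + 1) hi
        · exact i4 hr
        · have hrm : bsearchB d (mid + 1) hi = mid + 1 := by omega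
          rw [hrm]
          have hx : (mid + 1) * (mid + 1 + 1) = (mid + 1) * (mid + 2) := by ring
          rw [hx]
          omega
    · have he : lo = hi := by omega
      subst he
      rw [bsearchB]
      rw [dif_neg (lt_irrefl _)]
      exact ⟨le_refl _, le_refl _, hhi, fun hcon => absurd hcon (lt_irrefl _)⟩

-- A's loop, run from the generic state reached after j successful (non-break) steps
lemma range_map_shift (j M : Nat) :
    (List.range (M + 1)).map (fun u : Nat => ((j : Int) + 2 + (u : Int)))
      = ((j : Int) + 2) :: (List.range M).map (fun u : Nat => (((j + 1 : Nat)) : Int) + 2 + (u : Int)) := by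
  rw [List.range_succ_eq_map]
  simp only [List.map_cons, List.map_map, Nat.cast_zero, add_zero]
  congr 1
  apply List.map_congr_left
  intro u _
  simp only [Function.comp]
  push_cast
  ring

lemma foldl_ones (L : List Int) (init : List Int) :
    L.foldl (fun acc _ => acc ++ [(1 : Int)]) init = init ++ List.replicate L.length 1 := by
  rw [show (fun (acc : List Int) (_ : Int) => acc ++ [(1 : Int)])
      = (fun acc x => acc ++ [(fun _ : Int => (1 : Int)) x]) from rfl]
  rw [PySem.List.foldl_append_singleton_eq_map]
  simp [List.map_const']

lemma opA_eq (c : Int) : ∀ (a : Nat) (j : Nat) (l : List Int),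
    opAInner c (PySem.List.pyRange (a : Int) 0 (-1)) l (Tri j) ((j : Int) + 1) =
      if h : ∃ m : Nat, m < a ∧ c - ((a : Int) + (j : Int) + 1) ≤ Tri (j + m) then
        (l ++ (List.range (Nat.find h)).map (fun u : Nat => ((j : Int) + 2 + (u : Int)))
           ++ [c - Tri (j + Nat.find h) - ((a : Int) - ((Nat.find h : Nat) : Int)) + 1]
           ++ List.replicate (a - Nat.find h - 1) 1, c)
      else (l ++ (List.range a).map (fun u : Nat => ((j : Int) + 2 + (u : Int))), Tri (j + a)) := by
  intro a
  induction a with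
  | zero =>
    intro j l
    rw [PySem.List.pyRange_neg_one_eq_nil (by norm_num)]
    rw [dif_neg (by rintro ⟨m, hm, -⟩; omega)]
    simp [opAInner]
  | succ a ih =>
    intro j l
    have hcons : PySem.List.pyRange ((a + 1 : Nat) : Int) 0 (-1)
        = ((a + 1 : Nat) : Int) :: PySem.List.pyRange (((a + 1 : Nat) : Int) - 1) 0 (-1) :=
      PySem.List.pyRange_neg_one_cons (by push_cast; omega)
    have hsub : (((a + 1 : Nat) : Int) - 1) = (a : Int) := by push_cast; ring
    rw [hcons, hsub]
    simp only [opAInner]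
    by_cases hc : Tri j + ((j : Int) + 1 + 1) + ((a + 1 : Nat) : Int) - 1 ≥ c
    · rw [if_pos hc]
      have hex : ∃ m : Nat, m < a + 1 ∧ c - (((a + 1 : Nat) : Int) + (j : Int) + 1) ≤ Tri (j + m) := by
        refine ⟨0, by omega, ?_⟩
        simp only [Nat.add_zero]
        push_cast at hc ⊢
        omega
      rw [dif_pos hex]
      have hfind : Nat.find hex = 0 := by
        rw [Nat.find_eq_zero]
        refine ⟨by omega, ?_⟩
        simp only [Nat.add_zero]
        push_cast at hc ⊢
        omega
      rw [hfind]
      rw [foldl_ones]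
      rw [Prod.mk.injEq]
      constructor
      · have hlen : (PySem.List.pyRange 0 (((a + 1 : Nat) : Int) - 1) 1).length = a := by
          rw [PySem.List.length_pyRange_one]; push_cast; omega
        rw [hlen]
        simp only [List.range_zero, List.map_nil, List.append_nil, Nat.add_zero, Nat.sub_zero,
          Nat.cast_zero, sub_zero, Nat.add_sub_cancel]
      · rfl
    · rw [if_neg hc]
      have hstep : Tri j + ((j : Int) + 1 + 1) = Tri (j + 1) := by
        show _ = Tri j + ((j : Int) + 2)
        ring
      have hcc : (j : Int) + 1 + 1 = ((j + 1 : Nat) : Int) + 1 := by push_cast; ring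
      rw [hstep, hcc]
      rw [ih (j + 1) (l ++ [((j + 1 : Nat) : Int) + 1])]
      by_cases hex : ∃ m : Nat, m < a ∧ c - ((a : Int) + ((j + 1 : Nat) : Int) + 1) ≤ Tri (j + 1 + m)
      · rw [dif_pos hex]
        have hexS : ∃ m : Nat, m < a + 1 ∧ c - (((a + 1 : Nat) : Int) + (j : Int) + 1) ≤ Tri (j + m) := by
          obtain ⟨m, hm, hd⟩ := hex
          refine ⟨m + 1, by omega, ?_⟩
          have heq : j + 1 + m = j + (m + 1) := by omega
          rw [heq] at hd
          push_cast at hd ⊢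
          omega
        rw [dif_pos hexS]
        have hfind : Nat.find hexS = Nat.find hex + 1 := by
          rw [Nat.find_eq_iff]
          constructor
          · have h1 := (Nat.find_spec hex).2
            refine ⟨by have := (Nat.find_spec hex).1; omega, ?_⟩
            have heq : j + (Nat.find hex + 1) = j + 1 + Nat.find hex := by omega
            rw [heq]
            push_cast at h1 ⊢
            omega
          · intro k hk
            match k with
            | 0 =>
              rintro ⟨-, hd⟩
              simp only [Nat.add_zero] at hd
              push_cast at hc hd
              omega
            | u + 1 =>
              rintro ⟨hu, hd⟩
              apply Nat.find_min hex (by omega : u < Nat.find hex)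
              refine ⟨by omega, ?_⟩
              have heq : j + 1 + u = j + (u + 1) := by omega
              rw [heq]
              push_cast at hd ⊢
              omega
        rw [hfind]
        rw [Prod.mk.injEq]
        constructor
        · rw [range_map_shift]
          have e1 : ((j + 1 : Nat) : Int) + 1 = (j : Int) + 2 := by push_cast; ring
          have e2 : c - Tri (j + 1 + Nat.find hex) - ((a : Int) - ((Nat.find hex : Nat) : Int)) + 1
              = c - Tri (j + (Nat.find hex + 1)) - (((a + 1 : Nat) : Int) - ((Nat.find hex + 1 : Nat) : Int)) + 1 := by
            have heq : j + 1 + Nat.find hex = j + (Nat.find hex + 1) := by omega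
            rw [heq]; push_cast; ring
          have e3 : a - Nat.find hex - 1 = a + 1 - (Nat.find hex + 1) - 1 := by omega
          rw [e1, e2, e3]
          simp [List.append_assoc]
        · rfl
      · rw [dif_neg hex]
        have hexS : ¬ ∃ m : Nat, m < a + 1 ∧ c - (((a + 1 : Nat) : Int) + (j : Int) + 1) ≤ Tri (j + m) := by
          rintro ⟨m, hm, hd⟩
          match m with
          | 0 =>
            simp only [Nat.add_zero] at hd
            push_cast at hc hd
            omega
          | u + 1 =>
            apply hex
            refine ⟨u, by omega, ?_⟩
            have heq : j + 1 + u = j + (u + 1) := by omega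
            rw [heq]
            push_cast at hd ⊢
            omega
        rw [dif_neg hexS]
        rw [Prod.mk.injEq]
        constructor
        · rw [range_map_shift]
          have e1 : ((j + 1 : Nat) : Int) + 1 = (j : Int) + 2 := by push_cast; ring
          rw [e1]
          simp [List.append_assoc]
        · show Tri (j + 1 + a) = Tri (j + (a + 1))
          congr 1
          omega

-- ===== VERDICT (by name: the statement is the Claim_ definition above) =====
lemma operationL_unfold (n c : Int) : operationL n c =
    if c < n - 1 then []
    else if (opAInner c (PySem.List.pyRange (n - 1) 0 (-1)) [] 0 1).2 < c then []
    else (opAInner c (PySem.List.pyRange (n - 1) 0 (-1)) [] 0 1).1 := rfl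

lemma operationL_alt_unfold (n c : Int) : operationL_alt n c =
    if n < 2 ∨ c < n - 1 ∨ c > PySem.Int.floordiv (n * (n + 1)) 2 - 1 then []
    else
      PySem.List.pyRange 2 (bsearchB (c - n) 0 (n - 2) + 2) 1
        ++ [c - (PySem.Int.floordiv ((bsearchB (c - n) 0 (n - 2) + 1) * (bsearchB (c - n) 0 (n - 2) + 2)) 2 - 1)
              - (n - 1 - bsearchB (c - n) 0 (n - 2)) + 1]
        ++ PySem.List.pyRepeat [1] (n - 2 - bsearchB (c - n) 0 (n - 2)) := rfl

theorem operationL_spec : Claim_equal_operationL := by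
  intro n c _
  unfold Spec_operationL
  rw [operationL_unfold, operationL_alt_unfold]
  by_cases h1 : c < n - 1
  · rw [if_pos h1, if_pos (Or.inr (Or.inl h1))]
  rw [if_neg h1]
  by_cases h2 : n < 2
  · rw [if_pos (Or.inl h2)]
    rw [PySem.List.pyRange_neg_one_eq_nil (by omega)]
    simp only [opAInner]
    split <;> rfl
  · set a := (n - 1).toNat with hadef
    have ha : (a : Int) = n - 1 := by omega
    have ha1 : 1 ≤ a := by omega
    have hrange : PySem.List.pyRange (n - 1) 0 (-1) = PySem.List.pyRange ((a : Int)) 0 (-1) := by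
      rw [ha]
    rw [hrange]
    have H := opA_eq c a 0 []
    simp only [Nat.cast_zero, zero_add, add_zero, List.nil_append] at H
    have htri0 : Tri 0 = 0 := rfl
    rw [htri0] at H
    rw [H]
    have hcast1 : ((a - 1 : Nat) : Int) = n - 2 := by omega
    have htrie : PySem.Int.floordiv (n * (n + 1)) 2 - 1 = Tri a := by
      have hft := floordiv_tri a
      rw [ha] at hft
      have he : (n - 1 + 1) * (n - 1 + 2) = n * (n + 1) := by ring
      rw [he] at hft
      exact hft
    have htria : Tri a = Tri (a - 1) + n := by
      have he : a = (a - 1) + 1 := by omega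
      rw [he]
      show Tri (a - 1) + (((a - 1 : Nat) : Int) + 2) = _
      rw [hcast1]
      have he2 : a - 1 + 1 - 1 = a - 1 := by omega
      rw [he2]
      ring
    by_cases hex : ∃ m : Nat, m < a ∧ c - ((a : Int) + 1) ≤ Tri m
    · rw [dif_pos hex]
      set M := Nat.find hex with hMdef
      have hMspec : M < a ∧ c - ((a : Int) + 1) ≤ Tri M := by
        rw [hMdef]; exact Nat.find_spec hex
      have hMa : M < a := hMspec.1
      have hMle : c - n ≤ Tri M := by
        have := hMspec.2
        omega
      have hub : ¬ (c > PySem.Int.floordiv (n * (n + 1)) 2 - 1) := by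
        rw [htrie]
        have hmono := Tri_mono (show M ≤ a - 1 by omega)
        omega
      rw [if_neg (show ¬ (n < 2 ∨ c < n - 1 ∨ c > PySem.Int.floordiv (n * (n + 1)) 2 - 1) by
        rintro (h | h | h)
        · exact h2 h
        · exact h1 h
        · exact hub h)]
      -- the bsearch result equals M
      have hTriHi : c - n ≤ PySem.Int.floordiv ((n - 2 + 1) * (n - 2 + 2)) 2 - 1 := by
        have hf := floordiv_tri (a - 1)
        rw [hcast1] at hf
        have hmono := Tri_mono (show M ≤ a - 1 by omega)
        omega
      obtain ⟨b1, b2, b3, b4⟩ := bsearchB_inv (c - n) (n - 2 - 0).toNat 0 (n - 2)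
        (by omega) (by omega) (by omega) hTriHi
      have hr : bsearchB (c - n) 0 (n - 2) = (M : Int) := by
        set r := bsearchB (c - n) 0 (n - 2) with hrdef
        have hrnn : 0 ≤ r := b1
        set rN := r.toNat with hrN
        have hrcast : (rN : Int) = r := by omega
        have htrir : PySem.Int.floordiv ((r + 1) * (r + 2)) 2 - 1 = Tri rN := by
          have hft := floordiv_tri rN
          rw [hrcast] at hft
          exact hft
        have hdle : c - n ≤ Tri rN := by rw [← htrir]; exact b3
        have hMler : M ≤ rN := by
          by_contra hcon
          exact Nat.find_min hex (by omega : rN < M) ⟨by omega, by omega⟩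
        have hrleM : rN ≤ M := by
          by_contra hcon
          have h0r : 0 < r := by omega
          have hlt1 := b4 h0r
          have hcast2 : ((rN - 1 : Nat) : Int) = r - 1 := by omega
          have htrir1 : PySem.Int.floordiv (r * (r + 1)) 2 - 1 = Tri (rN - 1) := by
            have hf := floordiv_tri (rN - 1)
            rw [hcast2] at hf
            have he : (r - 1 + 1) * (r - 1 + 2) = r * (r + 1) := by ring
            rw [he] at hf
            exact hf
          have hmono := Tri_mono (show M ≤ rN - 1 by omega)
          omega
        omega
      rw [hr]
      rw [if_neg (lt_irrefl c)]
      rw [PySem.List.pyRange_one]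
      rw [PySem.List.pyRepeat_singleton]
      have ht1 : (((M : Int) + 2) - 2).toNat = M := by omega
      have ht2 : (n - 2 - (M : Int)).toNat = a - M - 1 := by omega
      have ht3 : PySem.Int.floordiv (((M : Int) + 1) * ((M : Int) + 2)) 2 - 1 = Tri M :=
        floordiv_tri M
      rw [ht1, ht2, ht3]
      have ht4 : c - Tri M - ((a : Int) - (M : Int)) + 1
          = c - Tri M - (n - 1 - (M : Int)) + 1 := by
        rw [ha]
      rw [ht4]
    · rw [dif_neg hex]
      have hgt : c > PySem.Int.floordiv (n * (n + 1)) 2 - 1 := by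
        rw [htrie]
        have hnc : ¬ (c - ((a : Int) + 1) ≤ Tri (a - 1)) := by
          intro hco
          exact hex ⟨a - 1, by omega, hco⟩
        omega
      rw [if_pos (Or.inr (Or.inr hgt))]
      have hlt : Tri a < c := by omega
      rw [if_pos hlt]
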